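-- pv_equiv track=rewrite | github.com/dwivediprashant/CareerCraft | ml-service/app/services/ats_scorer.py | score_skill_diversity
-- ===== SOURCE A (Python) =====
-- SKILL_CATEGORIES = {
--     "languages": {"c", "c++", "c#", "python", "javascript", "sql", "kotlin"},
--     "frameworks": {"fastapi", "react", "flutter", "express"},
--     "databases": {"mongodb", "firebase"},
--     "tools": {"git", "github", "postman", "vs code", "aws", "docker", "faiss"}
-- }
--
-- def score_skill_diversity(skills: list[str]) -> float:
--     present = set(skills)
--     categories_covered = 0
--
--     for group in SKILL_CATEGORIES.values():
--         if present & group: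
--             categories_covered += 1
--
--     if categories_covered >= 4:
--         return 8
--     elif categories_covered == 3:
--         return 6
--     elif categories_covered == 2:
--         return 4
--     else:
--         return 2
-- ===== SOURCE B (Python) =====
-- SKILL_CATEGORIES = {
--     "languages": {"c", "c++", "c#", "python", "javascript", "sql", "kotlin"},
--     "frameworks": {"fastapi", "react", "flutter", "express"},
--     "databases": {"mongodb", "firebase"},
--     "tools": {"git", "github", "postman", "vs code", "aws", "docker", "faiss"}
-- }
--
-- _SKILL_TO_CATEGORY = {skill: cat for cat, group in SKILL_CATEGORIES.items() for skill in group}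
-- _SCORES = (2, 2, 4, 6, 8)
--
-- def score_skill_diversity(skills: list[str]) -> float:
--     covered = set()
--     for s in skills:
--         cat = _SKILL_TO_CATEGORY.get(s)
--         if cat is not None:
--             covered.add(cat)
--     return _SCORES[len(covered)]
-- ===== Notes on version B (the rewrite author's own statement) =====
-- stated objective: alternative
-- what changed: B builds an inverted index (skill -> category name) once and makes a single pass over the input skills collecting covered category names in a set, then reads the score from a lookup table, instead of scanning the four category sets for a nonempty intersection with set(skills) and an if/elif chain.
import Mathlib
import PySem

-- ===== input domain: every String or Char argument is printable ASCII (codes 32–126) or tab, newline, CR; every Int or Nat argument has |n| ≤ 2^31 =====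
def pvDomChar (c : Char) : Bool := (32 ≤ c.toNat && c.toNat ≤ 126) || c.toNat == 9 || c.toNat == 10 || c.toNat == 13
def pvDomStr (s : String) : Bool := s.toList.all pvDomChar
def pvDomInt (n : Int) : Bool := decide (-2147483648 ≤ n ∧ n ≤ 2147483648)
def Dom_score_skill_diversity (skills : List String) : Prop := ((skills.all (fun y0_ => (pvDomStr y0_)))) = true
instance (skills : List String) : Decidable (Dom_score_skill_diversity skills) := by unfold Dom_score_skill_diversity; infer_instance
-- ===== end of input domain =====

-- B replaces A's scan over the four category sets by a single pass over the input
-- skills through a prebuilt inverted index (skill -> category name) and a score table.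

-- ===== PORT A =====
def pvLangs : List String := ["c", "c++", "c#", "python", "javascript", "sql", "kotlin"]
def pvFrameworks : List String := ["fastapi", "react", "flutter", "express"]
def pvDatabases : List String := ["mongodb", "firebase"]
def pvTools : List String := ["git", "github", "postman", "vs code", "aws", "docker", "faiss"]

def score_skill_diversity (skills : List String) : Int :=
  let present : PySem.Set String := PySem.Set.ofList skills
  let categories_covered : Int :=
    [PySem.Set.ofList pvLangs, PySem.Set.ofList pvFrameworks,
     PySem.Set.ofList pvDatabases, PySem.Set.ofList pvTools].foldl
      (fun c g => if PySem.Set.inter present g ≠ [] then c + 1 else c) 0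
  if categories_covered ≥ 4 then 8
  else if categories_covered = 3 then 6
  else if categories_covered = 2 then 4
  else 2

-- ===== PORT B =====
def pvIndex : PySem.Dict String String :=
  PySem.Dict.ofList
    [("c", "languages"), ("c++", "languages"), ("c#", "languages"), ("python", "languages"),
     ("javascript", "languages"), ("sql", "languages"), ("kotlin", "languages"),
     ("fastapi", "frameworks"), ("react", "frameworks"), ("flutter", "frameworks"),
     ("express", "frameworks"),
     ("mongodb", "databases"), ("firebase", "databases"),
     ("git", "tools"), ("github", "tools"), ("postman", "tools"), ("vs code", "tools"),
     ("aws", "tools"), ("docker", "tools"), ("faiss", "tools")]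

def score_skill_diversity_alt (skills : List String) : Int :=
  let covered : PySem.Set String :=
    skills.foldl (fun c s =>
      match pvIndex.get? s with
      | some cat => PySem.Set.add c cat
      | none => c) PySem.Set.empty
  PySem.List.pyGetD [2, 2, 4, 6, 8] (covered.length : Int) 0

-- ===== PRECONDITION & SPEC =====
def Spec_score_skill_diversity (skills : List String) (out : Int) : Prop := out = score_skill_diversity_alt skills
instance (skills : List String) (out : Int) : Decidable (Spec_score_skill_diversity skills out) := by unfold Spec_score_skill_diversity; infer_instance

-- ===== CLAIM (what is proved, stated in full; the proofs are below) =====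
def Claim_equal_score_skill_diversity : Prop := ∀ (skills : List String), Dom_score_skill_diversity skills → Spec_score_skill_diversity skills (score_skill_diversity skills)

-- ===== LEMMAS AND PROOFS =====

-- the inverted index as a literal Dict (Dict.ofList evaluated once)
set_option maxHeartbeats 2000000 in
lemma pvIndex_eq_mk : pvIndex = PySem.Dict.mk
    [("c", "languages"), ("c++", "languages"), ("c#", "languages"), ("python", "languages"),
     ("javascript", "languages"), ("sql", "languages"), ("kotlin", "languages"),
     ("fastapi", "frameworks"), ("react", "frameworks"), ("flutter", "frameworks"),
     ("express", "frameworks"),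
     ("mongodb", "databases"), ("firebase", "databases"),
     ("git", "tools"), ("github", "tools"), ("postman", "tools"), ("vs code", "tools"),
     ("aws", "tools"), ("docker", "tools"), ("faiss", "tools")] := by decide

set_option maxHeartbeats 1000000 in
lemma pvIndex_nodupkeys : pvIndex.keys.Nodup := by rw [pvIndex_eq_mk]; decide

set_option maxHeartbeats 1000000 in
lemma pvIndex_langs (s : String) : (pvIndex.get? s = some "languages") ↔ s ∈ pvLangs := by
  rw [PySem.Dict.get?_eq_some_iff_mem_items pvIndex s "languages" pvIndex_nodupkeys, pvIndex_eq_mk]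
  simp [pvLangs]

set_option maxHeartbeats 1000000 in
lemma pvIndex_frameworks (s : String) : (pvIndex.get? s = some "frameworks") ↔ s ∈ pvFrameworks := by
  rw [PySem.Dict.get?_eq_some_iff_mem_items pvIndex s "frameworks" pvIndex_nodupkeys, pvIndex_eq_mk]
  simp [pvFrameworks]

set_option maxHeartbeats 1000000 in
lemma pvIndex_databases (s : String) : (pvIndex.get? s = some "databases") ↔ s ∈ pvDatabases := by
  rw [PySem.Dict.get?_eq_some_iff_mem_items pvIndex s "databases" pvIndex_nodupkeys, pvIndex_eq_mk]
  simp [pvDatabases]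

set_option maxHeartbeats 1000000 in
lemma pvIndex_tools (s : String) : (pvIndex.get? s = some "tools") ↔ s ∈ pvTools := by
  rw [PySem.Dict.get?_eq_some_iff_mem_items pvIndex s "tools" pvIndex_nodupkeys, pvIndex_eq_mk]
  simp [pvTools]

set_option maxHeartbeats 1000000 in
lemma pvIndex_val {s c : String} (h : pvIndex.get? s = some c) :
    c ∈ (["languages", "frameworks", "databases", "tools"] : List String) := by
  rw [PySem.Dict.get?_eq_some_iff_mem_items pvIndex s c pvIndex_nodupkeys, pvIndex_eq_mk] at h
  simp at h ⊢
  tauto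

-- membership in B's fold
lemma mem_coveredFold (skills : List String) (c0 : PySem.Set String) (x : String) :
    (x ∈ skills.foldl (fun c s =>
      match pvIndex.get? s with
      | some cat => PySem.Set.add c cat
      | none => c) c0) ↔ x ∈ c0 ∨ ∃ s ∈ skills, pvIndex.get? s = some x := by
  induction skills generalizing c0 with
  | nil => simp
  | cons a l ih =>
    simp only [List.foldl_cons]
    cases h : pvIndex.get? a with
    | none =>
      rw [ih]
      simp [h]
    | some cat =>
      rw [ih]
      simp only [PySem.Set.mem_add, List.mem_cons]
      constructor
      · rintro ((hx | hx) | hx)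
        · exact Or.inl hx
        · exact Or.inr ⟨a, Or.inl rfl, by rw [hx]; exact h⟩
        · obtain ⟨s, hs, hg⟩ := hx
          exact Or.inr ⟨s, Or.inr hs, hg⟩
      · rintro (hx | ⟨s, hs | hs, hg⟩)
        · exact Or.inl (Or.inl hx)
        · subst hs; rw [h] at hg; injection hg with hg
          exact Or.inl (Or.inr hg.symm)
        · exact Or.inr ⟨s, hs, hg⟩

-- B's fold keeps the set Nodup
lemma nodup_coveredFold (skills : List String) (c0 : PySem.Set String) (h0 : c0.Nodup) :
    (skills.foldl (fun c s =>
      match pvIndex.get? s with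
      | some cat => PySem.Set.add c cat
      | none => c) c0).Nodup := by
  induction skills generalizing c0 with
  | nil => exact h0
  | cons a l ih =>
    simp only [List.foldl_cons]
    cases h : pvIndex.get? a with
    | none => exact ih c0 h0
    | some cat => exact ih _ (PySem.Set.nodup_add c0 cat h0)

-- nonempty intersection with set(skills) = some skill is in the group
lemma inter_cond (skills g : List String) :
    (PySem.Set.inter (PySem.Set.ofList skills) (PySem.Set.ofList g) ≠ []) ↔ ∃ s ∈ skills, s ∈ g := by
  rw [ne_eq, List.eq_nil_iff_forall_not_mem]
  push Not
  simp [PySem.Set.mem_inter, PySem.Set.mem_ofList]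

-- ===== VERDICT (by name: the statement is the Claim_ definition above) =====
theorem score_skill_diversity_spec : Claim_equal_score_skill_diversity := by
  intro skills _
  unfold Spec_score_skill_diversity
  unfold score_skill_diversity score_skill_diversity_alt
  simp only [List.foldl_cons, List.foldl_nil]
  simp only [inter_cond]
  have hlen : (skills.foldl (fun c s =>
      match pvIndex.get? s with
      | some cat => PySem.Set.add c cat
      | none => c) PySem.Set.empty).length =
      ((["languages", "frameworks", "databases", "tools"] : List String).filter
        (fun c => decide (∃ s ∈ skills, pvIndex.get? s = some c))).length := by
    apply List.Perm.length_eq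
    rw [List.perm_ext_iff_of_nodup
        (nodup_coveredFold skills PySem.Set.empty (by simp [PySem.Set.empty]))
        (List.Nodup.filter _
          (by decide : (["languages", "frameworks", "databases", "tools"] : List String).Nodup))]
    intro x
    rw [mem_coveredFold, List.mem_filter]
    simp only [PySem.Set.empty, List.not_mem_nil, false_or, decide_eq_true_eq]
    constructor
    · rintro ⟨s, hs, hg⟩
      exact ⟨pvIndex_val hg, s, hs, hg⟩
    · rintro ⟨_, hx⟩
      exact hx
  rw [hlen]
  simp only [List.filter_cons, List.filter_nil, decide_eq_true_eq,
    pvIndex_langs, pvIndex_frameworks, pvIndex_databases, pvIndex_tools]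
  by_cases h1 : ∃ s ∈ skills, s ∈ pvLangs <;>
  by_cases h2 : ∃ s ∈ skills, s ∈ pvFrameworks <;>
  by_cases h3 : ∃ s ∈ skills, s ∈ pvDatabases <;>
  by_cases h4 : ∃ s ∈ skills, s ∈ pvTools <;>
    simp [h1, h2, h3, h4, PySem.List.pyGetD]
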